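-- pv_equiv track=rewrite | github.com/Snazzythat/ECSE420_Lab2 | grid_4_4.py | get_neighbor_rank
-- ===== SOURCE A (Python) =====
-- GRID_SIZE = 4
--
-- def get_neighbor_rank(coord_tuple, dots_per_process):
--     #eliminate the boundary conditions first
--     rank = 0
--
--     if(coord_tuple[0] < 0 or coord_tuple[1]  < 0):
--         rank = -1
--     elif(coord_tuple[0] >= GRID_SIZE or coord_tuple[1] >= GRID_SIZE):
--         rank = -1
--     else:
--         rank_counter = -1
--         for j in range(0, GRID_SIZE):
--             for i in range(0, GRID_SIZE):
--                 rank_counter += 1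
--                 if(coord_tuple[0]==i and coord_tuple[1]==j):
--                     rank = rank_counter
--                     rank = int(rank/dots_per_process)
--     return rank
-- ===== SOURCE B (Python) =====
-- GRID_SIZE = 4
--
-- def get_neighbor_rank(coord_tuple, dots_per_process):
--     if coord_tuple[0] < 0 or coord_tuple[1] < 0:
--         return -1
--     if coord_tuple[0] >= GRID_SIZE or coord_tuple[1] >= GRID_SIZE:
--         return -1
--     return int((coord_tuple[1] * GRID_SIZE + coord_tuple[0]) / dots_per_process)
-- ===== Notes on version B (the rewrite author's own statement) =====
-- stated objective: simpler
-- what changed: Replaces A's 4x4 nested linear search for the matching coordinate by the closed-form rank y*GRID_SIZE + x divided by dots_per_process.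
import Mathlib
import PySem

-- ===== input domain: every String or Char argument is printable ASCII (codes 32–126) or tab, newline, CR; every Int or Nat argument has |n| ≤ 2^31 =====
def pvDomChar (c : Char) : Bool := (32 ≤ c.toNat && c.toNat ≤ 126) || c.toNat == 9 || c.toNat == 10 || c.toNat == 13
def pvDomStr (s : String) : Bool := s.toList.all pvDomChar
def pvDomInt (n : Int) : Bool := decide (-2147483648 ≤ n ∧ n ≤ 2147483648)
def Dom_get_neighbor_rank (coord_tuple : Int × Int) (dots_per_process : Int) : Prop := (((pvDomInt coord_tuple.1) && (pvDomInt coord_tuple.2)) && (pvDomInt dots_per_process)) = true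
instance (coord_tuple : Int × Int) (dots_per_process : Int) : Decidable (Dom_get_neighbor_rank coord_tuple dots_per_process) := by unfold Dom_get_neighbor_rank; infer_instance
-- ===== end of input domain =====

-- B replaces A's 4x4 nested search for the matching coordinate by the closed form
-- y*GRID_SIZE + x, divided; objective: simpler.


-- ===== PORT A =====
-- Python's int(rank/dpp) (float divide, then truncate) equals Int.tdiv here exactly:
-- rank ∈ [0,15] and |dpp| ≤ 2^31, so the float rounding error (< 2^-48) cannot cross an integer.
def get_neighbor_rank (coord_tuple : Int × Int) (dots_per_process : Int) : Int :=
  if coord_tuple.1 < 0 ∨ coord_tuple.2 < 0 then -1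
  else if coord_tuple.1 ≥ 4 ∨ coord_tuple.2 ≥ 4 then -1
  else
    -- state (rank, rank_counter), initial (0, -1)
    let st := (PySem.List.pyRange 0 4 1).foldl (fun (s : Int × Int) j =>
      (PySem.List.pyRange 0 4 1).foldl (fun (s : Int × Int) i =>
        let rc := s.2 + 1
        if coord_tuple.1 = i ∧ coord_tuple.2 = j then (Int.tdiv rc dots_per_process, rc)
        else (s.1, rc)) s) ((0 : Int), (-1 : Int))
    st.1

-- ===== PORT B =====
def get_neighbor_rank_alt (coord_tuple : Int × Int) (dots_per_process : Int) : Int :=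
  if coord_tuple.1 < 0 ∨ coord_tuple.2 < 0 then -1
  else if coord_tuple.1 ≥ 4 ∨ coord_tuple.2 ≥ 4 then -1
  else Int.tdiv (coord_tuple.2 * 4 + coord_tuple.1) dots_per_process

-- ===== PRECONDITION & SPEC =====
-- Pre_ excludes only the inputs where the Python raises ZeroDivisionError:
-- dots_per_process = 0 with an in-range coordinate (both programs divide there).
def Pre_get_neighbor_rank (coord_tuple : Int × Int) (dots_per_process : Int) : Prop :=
  (0 ≤ coord_tuple.1 ∧ coord_tuple.1 < 4 ∧ 0 ≤ coord_tuple.2 ∧ coord_tuple.2 < 4) → dots_per_process ≠ 0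
instance (coord_tuple : Int × Int) (dots_per_process : Int) : Decidable (Pre_get_neighbor_rank coord_tuple dots_per_process) := by unfold Pre_get_neighbor_rank; infer_instance
def pvWitness_get_neighbor_rank : (Int × Int) × Int := ((2, 3), 2)

def Spec_get_neighbor_rank (coord_tuple : Int × Int) (dots_per_process : Int) (out : Int) : Prop := out = get_neighbor_rank_alt coord_tuple dots_per_process
instance (coord_tuple : Int × Int) (dots_per_process : Int) (out : Int) : Decidable (Spec_get_neighbor_rank coord_tuple dots_per_process out) := by unfold Spec_get_neighbor_rank; infer_instance

-- ===== CLAIM (what is proved, stated in full; the proofs are below) =====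
def Claim_equal_get_neighbor_rank : Prop := ∀ (coord_tuple : Int × Int) (dots_per_process : Int), Dom_get_neighbor_rank coord_tuple dots_per_process → Pre_get_neighbor_rank coord_tuple dots_per_process → Spec_get_neighbor_rank coord_tuple dots_per_process (get_neighbor_rank coord_tuple dots_per_process)

-- ===== LEMMAS AND PROOFS =====

-- ===== VERDICT (by name: the statement is the Claim_ definition above) =====
theorem get_neighbor_rank_spec : Claim_equal_get_neighbor_rank := by
  intro ⟨x, y⟩ dpp _ _
  unfold Spec_get_neighbor_rank get_neighbor_rank get_neighbor_rank_alt
  by_cases h1 : x < 0 ∨ y < 0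
  · simp [h1]
  · by_cases h2 : x ≥ 4 ∨ y ≥ 4
    · simp [h1, h2]
    · simp only [h1, h2, if_false]
      push Not at h1 h2
      have hx0 : 0 ≤ x := h1.1
      have hy0 : 0 ≤ y := h1.2
      have hx4 : x < 4 := h2.1
      have hy4 : y < 4 := h2.2
      interval_cases x <;> interval_cases y <;>
        norm_num [PySem.List.pyRange, Int.toNat, List.range_succ, List.foldl]
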